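-- pv_equiv track=rewrite | github.com/pypi-data/pypi-mirror-74 | packages/QumuloUtils/QumuloUtils-3.1.6.tar.gz/QumuloUtils-3.1.6/QumuloUtils/qcluster.py | _return_snap_diffs
-- ===== SOURCE A (Python) =====
-- def _return_snap_diffs(snap_diffs):
--
--     created_list = []
--     modified_list = []
--     deleted_list = []
--
--     # Find out how many entries that we have and get all of the differences
--
--     for indx in enumerate(snap_diffs):
--         if indx[1]["op"] == "CREATE":
--             created_list.append(indx[1]["path"])
--         elif indx[1]["op"] == "MODIFY":
--             modified_list.append(indx[1]["path"])
--         else: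
--             deleted_list.append(indx[1]["path"])
--
--     return (created_list, modified_list, deleted_list)
-- ===== SOURCE B (Python) =====
-- def _return_snap_diffs(snap_diffs):
--     created_list = [d["path"] for d in snap_diffs if d["op"] == "CREATE"]
--     modified_list = [d["path"] for d in snap_diffs if d["op"] == "MODIFY"]
--     deleted_list = [d["path"] for d in snap_diffs if d["op"] not in ("CREATE", "MODIFY")]
--     return (created_list, modified_list, deleted_list)
-- ===== Notes on version B (the rewrite author's own statement) =====
-- stated objective: simpler
-- what changed: Replaces the single interleaved bucketing loop (with its unused enumerate index and mutable accumulators) by three independent order-preserving filtered comprehensions, one per output list.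
import Mathlib
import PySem

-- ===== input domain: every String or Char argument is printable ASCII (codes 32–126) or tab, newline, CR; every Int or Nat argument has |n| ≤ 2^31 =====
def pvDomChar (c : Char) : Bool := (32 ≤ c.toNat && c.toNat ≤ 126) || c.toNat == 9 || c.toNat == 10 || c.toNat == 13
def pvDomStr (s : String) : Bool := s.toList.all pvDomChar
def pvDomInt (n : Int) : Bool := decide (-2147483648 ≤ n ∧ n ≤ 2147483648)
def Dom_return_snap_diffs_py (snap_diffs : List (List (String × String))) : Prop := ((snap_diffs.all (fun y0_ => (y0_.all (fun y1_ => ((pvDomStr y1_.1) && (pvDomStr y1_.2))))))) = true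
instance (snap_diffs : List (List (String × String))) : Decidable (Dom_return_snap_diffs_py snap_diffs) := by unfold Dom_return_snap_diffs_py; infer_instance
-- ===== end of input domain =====

-- B replaces A's single interleaved bucketing loop by three independent filtered comprehensions (simpler decomposition).

-- ===== PORT A =====
-- d["k"] for a dict given as an assoc list; Pre_ guarantees the key is present, so the default is never used inside Pre_.
def pvGetKey (d : List (String × String)) (k : String) : String :=
  (PySem.Dict.mk d).getD k ""

-- literal port of A's enumerate loop with the three mutable accumulators (the index indx.1 is unused, as in A)
def return_snap_diffs_py (snap_diffs : List (List (String × String))) : List String × List String × List String :=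
  (PySem.List.enumerate snap_diffs 0).foldl
    (fun (acc : List String × List String × List String) indx =>
      if pvGetKey indx.2 "op" == "CREATE" then
        (acc.1 ++ [pvGetKey indx.2 "path"], acc.2.1, acc.2.2)
      else if pvGetKey indx.2 "op" == "MODIFY" then
        (acc.1, acc.2.1 ++ [pvGetKey indx.2 "path"], acc.2.2)
      else
        (acc.1, acc.2.1, acc.2.2 ++ [pvGetKey indx.2 "path"]))
    ([], [], [])

-- ===== PORT B =====
def return_snap_diffs_py_alt (snap_diffs : List (List (String × String))) : List String × List String × List String :=
  ((snap_diffs.filter (fun d => pvGetKey d "op" == "CREATE")).map (fun d => pvGetKey d "path"),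
   (snap_diffs.filter (fun d => pvGetKey d "op" == "MODIFY")).map (fun d => pvGetKey d "path"),
   (snap_diffs.filter (fun d => !(pvGetKey d "op" == "CREATE" || pvGetKey d "op" == "MODIFY"))).map (fun d => pvGetKey d "path"))

-- ===== PRECONDITION & SPEC =====
-- Pre_ excludes entries missing an "op" or "path" key, on which A (and B) raise KeyError.
def Pre_return_snap_diffs_py (snap_diffs : List (List (String × String))) : Prop :=
  (snap_diffs.all (fun d => ((PySem.Dict.mk d).get? "op").isSome && ((PySem.Dict.mk d).get? "path").isSome)) = true

instance (snap_diffs : List (List (String × String))) : Decidable (Pre_return_snap_diffs_py snap_diffs) := by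
  unfold Pre_return_snap_diffs_py; infer_instance

def pvWitness_return_snap_diffs_py : (List (List (String × String))) :=
  [[("op", "CREATE"), ("path", "/a")], [("op", "DELETE"), ("path", "/b")]]

def Spec_return_snap_diffs_py (snap_diffs : List (List (String × String))) (out : List String × List String × List String) : Prop := out = return_snap_diffs_py_alt snap_diffs
instance (snap_diffs : List (List (String × String))) (out : List String × List String × List String) : Decidable (Spec_return_snap_diffs_py snap_diffs out) := by unfold Spec_return_snap_diffs_py; infer_instance

-- ===== CLAIM (what is proved, stated in full; the proofs are below) =====
def Claim_equal_return_snap_diffs_py : Prop := ∀ (snap_diffs : List (List (String × String))), Dom_return_snap_diffs_py snap_diffs → Pre_return_snap_diffs_py snap_diffs → Spec_return_snap_diffs_py snap_diffs (return_snap_diffs_py snap_diffs)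

-- ===== LEMMAS AND PROOFS =====

-- A's loop, run from any accumulator and any enumerate start, appends B's three filtered lists.
theorem loop_appends (l : List (List (String × String))) :
    ∀ (s : Int) (acc : List String × List String × List String),
    (PySem.List.enumerate l s).foldl
      (fun (acc : List String × List String × List String) indx =>
        if pvGetKey indx.2 "op" == "CREATE" then
          (acc.1 ++ [pvGetKey indx.2 "path"], acc.2.1, acc.2.2)
        else if pvGetKey indx.2 "op" == "MODIFY" then
          (acc.1, acc.2.1 ++ [pvGetKey indx.2 "path"], acc.2.2)
        else
          (acc.1, acc.2.1, acc.2.2 ++ [pvGetKey indx.2 "path"]))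
      acc
    = (acc.1 ++ (l.filter (fun d => pvGetKey d "op" == "CREATE")).map (fun d => pvGetKey d "path"),
       acc.2.1 ++ (l.filter (fun d => pvGetKey d "op" == "MODIFY")).map (fun d => pvGetKey d "path"),
       acc.2.2 ++ (l.filter (fun d => !(pvGetKey d "op" == "CREATE" || pvGetKey d "op" == "MODIFY"))).map (fun d => pvGetKey d "path")) := by
  induction l with
  | nil => intro s acc; simp [PySem.List.enumerate_nil]
  | cons x xs ih =>
    intro s acc
    rw [PySem.List.enumerate_cons, List.foldl_cons, ih]
    by_cases h1 : pvGetKey x "op" = "CREATE"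
    · simp [List.filter_cons, h1]
    · by_cases h2 : pvGetKey x "op" = "MODIFY" <;> simp [List.filter_cons, h1, h2]

-- ===== VERDICT (by name: the statement is the Claim_ definition above) =====
theorem return_snap_diffs_py_spec : Claim_equal_return_snap_diffs_py := by
  intro snap_diffs _ _
  unfold Spec_return_snap_diffs_py return_snap_diffs_py return_snap_diffs_py_alt
  rw [loop_appends snap_diffs 0 ([], [], [])]
  simp
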